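-- pv_equiv track=rewrite | github.com/asa1997/giskard_test | test.py | _select_best_dataset_split
-- ===== SOURCE A (Python) =====
-- def _select_best_dataset_split(split_names):
--         """Get the best split for testing.
--
--         Selects the split `test` if available, otherwise `validation`, and as a last resort `train`.
--         If there is only one split, we return that split.
--         """
--         # If only one split is available, we just use that one.
--         if len(split_names) == 1:
--             return split_names[0]
--
--         # Otherwise iterate based on the preferred prefixes.
--         for prefix in ["test", "valid", "train"]:
--             try:
--                 return next(x for x in split_names if x.startswith(prefix))
--             except StopIteration:
--                 pass
--
--         return None
-- ===== SOURCE B (Python) =====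
-- def _select_best_dataset_split(split_names):
--     # Simpler: one priority key + a single min pass instead of three sequential scans.
--     if len(split_names) == 1:
--         return split_names[0]
--     prefixes = ["test", "valid", "train"]
--
--     def priority(name):
--         return next((i for i, p in enumerate(prefixes) if name.startswith(p)), 3)
--
--     best = min(split_names, key=priority, default=None)
--     if best is None or priority(best) == 3:
--         return None
--     return best
-- ===== Notes on version B (the rewrite author's own statement) =====
-- stated objective: simpler
-- what changed: Replaces the three sequential first-match scans (with try/except StopIteration) by a single priority key (index of the first matching prefix, 3 if none) and one min() pass that keeps the first element with minimal priority.
import Mathlib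
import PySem

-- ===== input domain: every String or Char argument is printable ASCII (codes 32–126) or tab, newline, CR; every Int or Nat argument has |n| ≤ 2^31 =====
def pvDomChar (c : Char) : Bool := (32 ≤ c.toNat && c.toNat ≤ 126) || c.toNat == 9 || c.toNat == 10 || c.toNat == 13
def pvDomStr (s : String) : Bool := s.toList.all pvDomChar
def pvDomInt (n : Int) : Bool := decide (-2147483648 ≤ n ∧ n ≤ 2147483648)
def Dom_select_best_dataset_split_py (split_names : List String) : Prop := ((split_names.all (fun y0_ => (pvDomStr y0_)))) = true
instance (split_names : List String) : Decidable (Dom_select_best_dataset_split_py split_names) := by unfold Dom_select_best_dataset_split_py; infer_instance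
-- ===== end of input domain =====

-- B replaces A's three sequential first-match scans by one priority key and a single min pass (objective: simpler).

-- ===== PORT A =====
-- the for-loop over prefixes: for each prefix try the first matching element, else next prefix
def pyChainA (split_names : List String) : List String → Option String
  | [] => none
  | p :: ps =>
    match split_names.find? (fun x => PySem.Str.startswith x p) with
    | some x => some x
    | none => pyChainA split_names ps

def select_best_dataset_split_py (split_names : List String) : Option String :=
  if split_names.length == 1 then PySem.List.pyGet? split_names 0
  else pyChainA split_names ["test", "valid", "train"]

-- ===== PORT B =====
-- priority(name) = next((i for i,p in enumerate(prefixes) if name.startswith(p)), 3)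
def pvPriority (name : String) : Int :=
  match (PySem.List.enumerate ["test", "valid", "train"]).find?
      (fun ip => PySem.Str.startswith name ip.2) with
  | some ip => ip.1
  | none => 3

def select_best_dataset_split_py_alt (split_names : List String) : Option String :=
  if split_names.length == 1 then PySem.List.pyGet? split_names 0
  else
    match PySem.List.min? split_names pvPriority with
    | none => none
    | some best => if pvPriority best == 3 then none else some best

-- ===== PRECONDITION & SPEC =====
def Spec_select_best_dataset_split_py (split_names : List String) (out : Option String) : Prop := out = select_best_dataset_split_py_alt split_names
instance (split_names : List String) (out : Option String) : Decidable (Spec_select_best_dataset_split_py split_names out) := by unfold Spec_select_best_dataset_split_py; infer_instance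

-- ===== CLAIM (what is proved, stated in full; the proofs are below) =====
def Claim_equal_select_best_dataset_split_py : Prop := ∀ (split_names : List String), Dom_select_best_dataset_split_py split_names → Spec_select_best_dataset_split_py split_names (select_best_dataset_split_py split_names)

-- ===== LEMMAS AND PROOFS =====

-- B's general path (no length guard), as a function of the list
def pvGenB (ns : List String) : Option String :=
  match PySem.List.min? ns pvPriority with
  | none => none
  | some best => if pvPriority best == 3 then none else some best

lemma priority_eq (name : String) :
    pvPriority name =
      if PySem.Str.startswith name "test" then 0
      else if PySem.Str.startswith name "valid" then 1
      else if PySem.Str.startswith name "train" then 2 else 3 := by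
  simp only [pvPriority, PySem.List.enumerate_cons, PySem.List.enumerate_nil, List.find?]
  split_ifs <;> simp_all

lemma minFold_cons (b x : String) (l : List String) :
    PySem.List.min? (b :: x :: l) pvPriority =
      PySem.List.min? ((if pvPriority x < pvPriority b then x else b) :: l) pvPriority := by
  simp only [PySem.List.min?, List.foldl]
  split_ifs <;> rfl

set_option maxHeartbeats 2000000 in
lemma chainA_cons_cons (b x : String) (l : List String) :
    pyChainA (b :: x :: l) ["test", "valid", "train"] =
      pyChainA ((if pvPriority x < pvPriority b then x else b) :: l) ["test", "valid", "train"] := by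
  have hb := priority_eq b
  have hx := priority_eq x
  by_cases t1 : PySem.Str.startswith b "test" <;>
    by_cases t2 : PySem.Str.startswith b "valid" <;>
    by_cases t3 : PySem.Str.startswith b "train" <;>
    by_cases s1 : PySem.Str.startswith x "test" <;>
    by_cases s2 : PySem.Str.startswith x "valid" <;>
    by_cases s3 : PySem.Str.startswith x "train" <;>
    simp_all [pyChainA, List.find?]

lemma chainA_singleton_base (b : String) :
    pyChainA [b] ["test", "valid", "train"] = pvGenB [b] := by
  simp only [pvGenB, PySem.List.min?, List.foldl]
  have hb := priority_eq b
  by_cases t1 : PySem.Str.startswith b "test" <;>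
    by_cases t2 : PySem.Str.startswith b "valid" <;>
    by_cases t3 : PySem.Str.startswith b "train" <;>
    simp_all [pyChainA, List.find?]

lemma chainA_eq_genB : ∀ (l : List String) (b : String),
    pyChainA (b :: l) ["test", "valid", "train"] = pvGenB (b :: l)
  | [], b => chainA_singleton_base b
  | x :: l, b => by
    rw [chainA_cons_cons]
    rw [chainA_eq_genB l (if pvPriority x < pvPriority b then x else b)]
    simp only [pvGenB, minFold_cons]

-- ===== VERDICT (by name: the statement is the Claim_ definition above) =====
theorem select_best_dataset_split_py_spec : Claim_equal_select_best_dataset_split_py := by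
  intro ns _
  unfold Spec_select_best_dataset_split_py select_best_dataset_split_py select_best_dataset_split_py_alt
  match ns with
  | [] => rfl
  | [b] => rfl
  | b :: x :: l =>
    simp only [List.length_cons, show (l.length + 1 + 1 == 1) = false by simp]
    exact chainA_eq_genB (x :: l) b
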